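-- pv_equiv track=rewrite | github.com/yeiichi/csvsmith | src/csvsmith/duplicates.py | count_duplicates_sorted
-- ===== SOURCE A (Python) =====
-- from collections import Counter
-- from typing import Iterable, List, Tuple, Hashable, Sequence, Optional
--
-- def count_duplicates_sorted(
--     items: Iterable[Hashable],
--     threshold: int = 2,
--     reverse: bool = True,
-- ) -> List[Tuple[Hashable, int]]:
--     """
--     Count occurrences in an iterable and return items whose frequency
--     is at or above `threshold`, sorted by count.
--
--     Args:
--         items:
--             Any iterable of hashable items (str, int, tuple, etc.)
--         threshold:
--             Minimum count to include in output (default: 2).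
--         reverse:
--             Whether to sort in descending order (default: True).
--
--     Returns:
--         A list of (item, count) tuples sorted by frequency.
--     """
--     counter = Counter(items)
--     duplicates = [(k, v) for k, v in counter.items() if v >= threshold]
--     duplicates.sort(key=lambda x: x[1], reverse=reverse)
--     return duplicates
-- ===== SOURCE B (Python) =====
-- def count_duplicates_sorted(items, threshold=2, reverse=True):
--     counts = {}
--     for it in items:
--         counts[it] = counts.get(it, 0) + 1
--     maxc = max(counts.values(), default=0)
--     buckets = [[] for _ in range(maxc + 1)]
--     for k, v in counts.items():
--         if v >= threshold:
--             buckets[v].append((k, v))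
--     order = reversed(range(maxc + 1)) if reverse else range(maxc + 1)
--     out = []
--     for c in order:
--         out.extend(buckets[c])
--     return out
-- ===== Notes on version B (the rewrite author's own statement) =====
-- stated objective: alternative
-- what changed: A filters the counter's pairs and comparison-sorts them by count; B counting-sorts instead: it drops each qualifying (item, count) pair into a bucket indexed by its count and emits the buckets from high to low count (low to high when reverse is False), preserving first-occurrence order within equal counts.
import Mathlib
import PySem

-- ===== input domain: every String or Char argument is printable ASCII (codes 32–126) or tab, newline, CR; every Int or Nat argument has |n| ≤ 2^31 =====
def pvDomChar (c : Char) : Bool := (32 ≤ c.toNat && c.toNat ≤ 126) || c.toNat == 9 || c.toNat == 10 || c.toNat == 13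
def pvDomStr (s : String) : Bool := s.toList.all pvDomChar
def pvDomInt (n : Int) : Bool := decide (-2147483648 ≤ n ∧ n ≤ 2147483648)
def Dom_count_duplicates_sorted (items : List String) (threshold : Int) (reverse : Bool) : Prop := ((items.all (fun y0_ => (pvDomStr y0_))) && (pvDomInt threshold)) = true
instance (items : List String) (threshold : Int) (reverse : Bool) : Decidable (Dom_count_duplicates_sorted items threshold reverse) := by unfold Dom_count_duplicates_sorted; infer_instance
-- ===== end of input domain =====

-- B replaces A's comparison sort of the (item, count) pairs by a counting sort into
-- frequency-indexed buckets emitted high-to-low (or low-to-high); objective: alternative.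

-- ===== PORT A =====
-- Counter(items); keep pairs with count >= threshold; stable sort by count, reverse flag.
def count_duplicates_sorted (items : List String) (threshold : Int) (reverse : Bool) : List (String × Int) :=
  let counter := PySem.Dict.counter items
  let duplicates := counter.items.filter (fun kv => decide (threshold ≤ kv.2))
  PySem.List.sorted duplicates (fun x => x.2) reverse

-- ===== PORT B =====
-- counting dict; buckets indexed by frequency; emit buckets in order (reversed when reverse).
def count_duplicates_sorted_alt (items : List String) (threshold : Int) (reverse : Bool) : List (String × Int) :=
  let counts := items.foldl (fun d x => d.insert x (d.getD x 0 + 1)) PySem.Dict.empty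
  let maxc := PySem.List.maxD counts.values (fun v => v) 0
  let buckets0 : List (List (String × Int)) := (PySem.List.pyRange 0 (maxc + 1)).map (fun _ => [])
  let buckets := counts.items.foldl
    (fun bs kv => if threshold ≤ kv.2 then bs.set kv.2.toNat (bs.getD kv.2.toNat [] ++ [kv]) else bs)
    buckets0
  let order := if reverse then (PySem.List.pyRange 0 (maxc + 1)).reverse else PySem.List.pyRange 0 (maxc + 1)
  order.foldl (fun out c => out ++ PySem.List.pyGetD buckets c []) []

-- ===== PRECONDITION & SPEC =====
def Spec_count_duplicates_sorted (items : List String) (threshold : Int) (reverse : Bool) (out : List (String × Int)) : Prop := out = count_duplicates_sorted_alt items threshold reverse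
instance (items : List String) (threshold : Int) (reverse : Bool) (out : List (String × Int)) : Decidable (Spec_count_duplicates_sorted items threshold reverse out) := by unfold Spec_count_duplicates_sorted; infer_instance

-- ===== CLAIM (what is proved, stated in full; the proofs are below) =====
def Claim_equal_count_duplicates_sorted : Prop := ∀ (items : List String) (threshold : Int) (reverse : Bool), Dom_count_duplicates_sorted items threshold reverse → Spec_count_duplicates_sorted items threshold reverse (count_duplicates_sorted items threshold reverse)

-- ===== LEMMAS AND PROOFS =====

-- inserting past a prefix it does not go before
lemma pv_insertBy_append {α : Type} (before : α → α → Bool) (x : α) (l1 l2 : List α)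
    (h : ∀ y ∈ l1, before x y = false) :
    PySem.List.insertBy before x (l1 ++ l2) = l1 ++ PySem.List.insertBy before x l2 := by
  induction l1 with
  | nil => simp
  | cons y ys ih =>
      have hy : before x y = false := h y (by simp)
      simp only [List.cons_append, PySem.List.insertBy, hy, Bool.false_eq_true, if_false]
      exact congrArg (y :: ·) (ih (fun z hz => h z (by simp [hz])))

-- elements of the bucket concatenation carry a key from vs
lemma pv_mem_buckets {vs : List Int} {p : List (String × Int)} {y : String × Int}
    (hy : y ∈ vs.flatMap (fun c => p.filter (fun z => z.2 == c))) : y.2 ∈ vs := by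
  obtain ⟨c, hc, hy'⟩ := List.mem_flatMap.mp hy
  have := (List.mem_filter.mp hy').2
  simp only [beq_iff_eq] at this
  exact this ▸ hc

-- one stable insertion lands at the end of its key's bucket
lemma pv_insert_bucket (lt : Int → Int → Bool) (hirr : ∀ c, lt c c = false) :
    ∀ (vs : List Int), vs.Pairwise (fun a b => lt a b = true ∧ lt b a = false) →
    ∀ (p : List (String × Int)) (x : String × Int), x.2 ∈ vs →
    PySem.List.insertBy (fun a b => lt a.2 b.2) x (vs.flatMap (fun c => p.filter (fun z => z.2 == c)))
      = vs.flatMap (fun c => (p ++ [x]).filter (fun z => z.2 == c)) := by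
  intro vs
  induction vs with
  | nil => intro _ p x hx; simp at hx
  | cons c vs ih =>
      intro hvs p x hx
      obtain ⟨hc, hvs'⟩ := List.pairwise_cons.mp hvs
      have hbc : ∀ z ∈ p.filter (fun z => z.2 == c), z.2 = c := by
        intro z hz
        have := (List.mem_filter.mp hz).2
        simpa using this
      simp only [List.flatMap_cons]
      by_cases hx2 : x.2 = c
      · have hpass : ∀ y ∈ p.filter (fun z => z.2 == c), lt x.2 y.2 = false := by
          intro y hy; rw [hbc y hy, hx2]; exact hirr c
        rw [pv_insertBy_append _ _ _ _ hpass]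
        have hrest : PySem.List.insertBy (fun a b => lt a.2 b.2) x
            (vs.flatMap (fun c' => p.filter (fun z => z.2 == c')))
            = x :: vs.flatMap (fun c' => p.filter (fun z => z.2 == c')) := by
          cases h : vs.flatMap (fun c' => p.filter (fun z => z.2 == c')) with
          | nil => simp [PySem.List.insertBy]
          | cons y ys =>
              have hy2 : y.2 ∈ vs := pv_mem_buckets (h ▸ List.mem_cons_self)
              have : lt x.2 y.2 = true := by rw [hx2]; exact (hc y.2 hy2).1
              simp [PySem.List.insertBy, this]
        rw [hrest]
        have hxc' : ∀ c' ∈ vs, (p ++ [x]).filter (fun z => z.2 == c') = p.filter (fun z => z.2 == c') := by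
          intro c' hc'
          have hne : x.2 ≠ c' := by
            intro hEq
            have h1 := (hc c' hc').1
            rw [← hEq, ← hx2] at h1
            rw [hirr x.2] at h1; exact Bool.false_ne_true h1
          simp [List.filter_append, hne]
        rw [List.flatMap_congr hxc']
        simp [List.filter_append, hx2]
      · have hxvs : x.2 ∈ vs := by
          rcases List.mem_cons.mp hx with h | h
          · exact absurd h hx2
          · exact h
        have hlt := hc x.2 hxvs
        have hpass : ∀ y ∈ p.filter (fun z => z.2 == c), lt x.2 y.2 = false := by
          intro y hy; rw [hbc y hy]; exact hlt.2
        rw [pv_insertBy_append _ _ _ _ hpass, ih hvs' p x hxvs]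
        have : (p ++ [x]).filter (fun z => z.2 == c) = p.filter (fun z => z.2 == c) := by
          simp [List.filter_append, hx2]
        rw [this]

-- the whole insertion-sort fold builds the bucket concatenation
lemma pv_foldl_buckets (lt : Int → Int → Bool) (hirr : ∀ c, lt c c = false)
    (vs : List Int) (hvs : vs.Pairwise (fun a b => lt a b = true ∧ lt b a = false)) :
    ∀ (l p : List (String × Int)), (∀ x ∈ l, x.2 ∈ vs) →
    l.foldl (fun acc x => PySem.List.insertBy (fun a b => lt a.2 b.2) x acc)
        (vs.flatMap (fun c => p.filter (fun z => z.2 == c)))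
      = vs.flatMap (fun c => (p ++ l).filter (fun z => z.2 == c)) := by
  intro l
  induction l with
  | nil => intro p _; simp
  | cons x l ih =>
      intro p hl
      simp only [List.foldl_cons]
      rw [pv_insert_bucket lt hirr vs hvs p x (hl x (by simp))]
      have := ih (p ++ [x]) (fun y hy => hl y (by simp [hy]))
      rw [this]
      simp
lemma pv_sorted_buckets (lt : Int → Int → Bool) (hirr : ∀ c, lt c c = false)
    (vs : List Int) (hvs : vs.Pairwise (fun a b => lt a b = true ∧ lt b a = false))
    (l : List (String × Int)) (hl : ∀ x ∈ l, x.2 ∈ vs) :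
    l.foldl (fun acc x => PySem.List.insertBy (fun a b => lt a.2 b.2) x acc) []
      = vs.flatMap (fun c => l.filter (fun z => z.2 == c)) := by
  have h := pv_foldl_buckets lt hirr vs hvs l [] hl
  have hnil : List.flatMap (fun c => List.filter (fun z => z.2 == c) ([] : List (String × Int))) vs = [] :=
    List.flatMap_eq_nil_iff.mpr (by simp)
  rw [hnil] at h
  simpa using h

-- the bucket-fill fold, read back pointwise
lemma pv_fill_length (threshold : Int) :
    ∀ (l : List (String × Int)) (bs : List (List (String × Int))),
    (l.foldl (fun bs kv => if threshold ≤ kv.2 then bs.set kv.2.toNat (bs.getD kv.2.toNat [] ++ [kv]) else bs) bs).length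
      = bs.length := by
  intro l
  induction l with
  | nil => intro bs; rfl
  | cons kv l ih =>
      intro bs
      simp only [List.foldl_cons]
      by_cases h : threshold ≤ kv.2
      · rw [if_pos h, ih, List.length_set]
      · rw [if_neg h, ih]

lemma pv_fill_getD (threshold : Int) :
    ∀ (l : List (String × Int)) (bs : List (List (String × Int))) (i : Nat),
      (∀ kv ∈ l, threshold ≤ kv.2 → 0 ≤ kv.2 ∧ kv.2.toNat < bs.length) →
      (l.foldl (fun bs kv => if threshold ≤ kv.2 then bs.set kv.2.toNat (bs.getD kv.2.toNat [] ++ [kv]) else bs) bs).getD i []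
        = bs.getD i [] ++ l.filter (fun z => decide (threshold ≤ z.2) && z.2 == ((i : Nat) : Int)) := by
  intro l
  induction l with
  | nil => intro bs i _; simp
  | cons kv l ih =>
      intro bs i hb
      simp only [List.foldl_cons]
      by_cases hth : threshold ≤ kv.2
      · obtain ⟨h0, hlt⟩ := hb kv (by simp) hth
        have hcast : ((kv.2.toNat : Nat) : Int) = kv.2 := Int.toNat_of_nonneg h0
        have hstep := ih (bs.set kv.2.toNat (bs.getD kv.2.toNat [] ++ [kv])) i
          (by intro z hz hthz
              obtain ⟨hz0, hzlt⟩ := hb z (by simp [hz]) hthz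
              exact ⟨hz0, by simpa using hzlt⟩)
        simp only [if_pos hth] at *
        rw [hstep]
        by_cases hi : kv.2.toNat = i
        · have hbeq : (kv.2 == ((i : Nat) : Int)) = true := by
            rw [← hi, hcast]; simp
          have : (bs.set kv.2.toNat (bs.getD kv.2.toNat [] ++ [kv])).getD i []
              = bs.getD i [] ++ [kv] := by
            rw [← hi]
            simp [List.getD_eq_getElem?_getD, hlt]
          rw [this]
          simp [hth, hbeq]
        · have hbeq : (kv.2 == ((i : Nat) : Int)) = false := by
            rw [← hcast]
            simp only [beq_eq_false_iff_ne, ne_eq, Int.natCast_inj]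
            exact fun h => hi (by exact_mod_cast h)
          have : (bs.set kv.2.toNat (bs.getD kv.2.toNat [] ++ [kv])).getD i []
              = bs.getD i [] := by
            simp [List.getD_eq_getElem?_getD, hi]
          rw [this]
          simp [hbeq]
      · have hstep := ih bs i (fun z hz => hb z (by simp [hz]))
        simp only [if_neg hth]
        rw [hstep]
        have : (decide (threshold ≤ kv.2)) = false := by simpa using hth
        simp [this]

lemma pv_getD_map_nil (xs : List Int) (i : Nat) :
    ((xs.map (fun _ => ([] : List (String × Int)))).getD i []) = [] := by
  simp only [List.getD_eq_getElem?_getD, List.getElem?_map]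
  cases xs[i]? <;> simp

-- ===== VERDICT (by name: the statement is the Claim_ definition above) =====
theorem count_duplicates_sorted_spec : Claim_equal_count_duplicates_sorted := by
  intro items threshold reverse _
  unfold Spec_count_duplicates_sorted
  simp only [count_duplicates_sorted, count_duplicates_sorted_alt]
  rw [PySem.Dict.foldl_insert_getD_add_one_eq_counter]
  set P := (PySem.Dict.counter items).items with hP
  set maxc := PySem.List.maxD (PySem.Dict.counter items).values (fun v => v) 0 with hmaxc
  -- value facts
  have hvalmem : ∀ v ∈ (PySem.Dict.counter items).values, ∃ x ∈ P, x.2 = v := by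
    intro v hv
    simpa [PySem.Dict.values] using (List.mem_map.mp hv)
  have hval1 : ∀ x ∈ P, 1 ≤ x.2 := by
    intro x hx
    rw [hP, PySem.Dict.items_counter] at hx
    obtain ⟨k, hk, rfl⟩ := List.mem_map.mp hx
    have hk' : k ∈ items := (PySem.Set.mem_ofList items k).mp hk
    have : 0 < items.count k := List.count_pos_iff.mpr hk'
    simpa using this
  have hvalmax : ∀ x ∈ P, x.2 ≤ maxc := by
    intro x hx
    have hv : x.2 ∈ (PySem.Dict.counter items).values := by
      simp only [PySem.Dict.values]
      exact List.mem_map_of_mem hx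
    rcases hm : PySem.List.max? (PySem.Dict.counter items).values (fun v => v) with _ | m
    · rw [PySem.List.max?_eq_none_iff] at hm
      rw [hm] at hv; simp at hv
    · have : maxc = m := by rw [hmaxc]; simp [PySem.List.maxD, hm]
      rw [this]
      exact PySem.List.max?_isMax hm x.2 hv
  have hmax0 : 0 ≤ maxc := by
    rcases hm : PySem.List.max? (PySem.Dict.counter items).values (fun v => v) with _ | m
    · rw [hmaxc]; simp [PySem.List.maxD, hm]
    · have hmem := PySem.List.max?_mem hm
      obtain ⟨x, hx, hxv⟩ := hvalmem m hmem
      have : maxc = m := by rw [hmaxc]; simp [PySem.List.maxD, hm]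
      rw [this, ← hxv]
      exact le_trans (by norm_num) (hval1 x hx)
  -- the index range
  set N : Nat := maxc.toNat + 1 with hN
  have hcastN : maxc + 1 = ((N : Nat) : Int) := by rw [hN]; omega
  have hpy : PySem.List.pyRange 0 ((N : Nat) : Int) = List.map (fun k : Nat => (k : Int)) (List.range N) :=
    PySem.List.pyRange_zero_natCast N
  rw [hcastN, hpy]
  set rng : List Int := List.map (fun k : Nat => (k : Int)) (List.range N) with hrng
  -- membership of duplicate keys in rng
  have hmemrng : ∀ x ∈ P, x.2 ∈ rng := by
    intro x hx
    have h1 := hval1 x hx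
    have h2 := hvalmax x hx
    have hlt : x.2.toNat < N := by omega
    have hc : ((x.2.toNat : Nat) : Int) = x.2 := by omega
    rw [hrng]
    exact List.mem_map.mpr ⟨x.2.toNat, List.mem_range.mpr hlt, hc⟩
  have hrngpair : rng.Pairwise (· < ·) := by
    rw [hrng]
    refine List.pairwise_map.mpr (List.pairwise_lt_range.imp ?_)
    intro a b h
    exact_mod_cast h
  -- buckets
  have hbuck0len : (rng.map (fun _ => ([] : List (String × Int)))).length = N := by
    simp [hrng]
  have hfillhyp : ∀ kv ∈ P, threshold ≤ kv.2 →
      0 ≤ kv.2 ∧ kv.2.toNat < (rng.map (fun _ => ([] : List (String × Int)))).length := by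
    intro kv hkv _
    have h1 := hval1 kv hkv
    have h2 := hvalmax kv hkv
    rw [hbuck0len]
    constructor <;> omega
  have hbucklen : (P.foldl (fun bs kv => if threshold ≤ kv.2 then bs.set kv.2.toNat (bs.getD kv.2.toNat [] ++ [kv]) else bs)
      (rng.map (fun _ => ([] : List (String × Int))))).length = N := by
    rw [pv_fill_length, hbuck0len]
  have hbuckget : ∀ c ∈ rng,
      PySem.List.pyGetD (P.foldl (fun bs kv => if threshold ≤ kv.2 then bs.set kv.2.toNat (bs.getD kv.2.toNat [] ++ [kv]) else bs)
        (rng.map (fun _ => ([] : List (String × Int))))) c []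
      = P.filter (fun z => decide (threshold ≤ z.2) && z.2 == c) := by
    intro c hc
    obtain ⟨k, hk, rfl⟩ := List.mem_map.mp (hrng ▸ hc)
    rw [PySem.List.pyGetD_of_nonneg _ _ (Int.natCast_nonneg k)]
    rw [Int.toNat_natCast, pv_fill_getD threshold P _ k hfillhyp, pv_getD_map_nil]
    simp
  -- B's final loop is a flatMap over the order list
  have hBfold : ∀ (order : List Int),
      order.foldl (fun out c => out ++ PySem.List.pyGetD (P.foldl (fun bs kv => if threshold ≤ kv.2 then bs.set kv.2.toNat (bs.getD kv.2.toNat [] ++ [kv]) else bs)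
        (rng.map (fun _ => ([] : List (String × Int))))) c []) []
      = order.flatMap (fun c => PySem.List.pyGetD (P.foldl (fun bs kv => if threshold ≤ kv.2 then bs.set kv.2.toNat (bs.getD kv.2.toNat [] ++ [kv]) else bs)
        (rng.map (fun _ => ([] : List (String × Int))))) c []) := by
    intro order
    rw [PySem.List.foldl_append_eq_flatMap]
    simp
  -- A's sort is the bucket concatenation over the same order list
  have hfiltereq : ∀ c ∈ rng,
      (P.filter (fun kv => decide (threshold ≤ kv.2))).filter (fun z => z.2 == c)
      = P.filter (fun z => decide (threshold ≤ z.2) && z.2 == c) := by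
    intro c _
    rw [List.filter_filter]
    exact List.filter_congr (fun z _ => Bool.and_comm _ _)
  cases reverse with
  | false =>
      simp only [Bool.false_eq_true, if_false]
      rw [PySem.List.sorted_eq_foldl_insertBy]
      have hsorted := pv_sorted_buckets (fun u v => decide (u < v)) (fun c => by simp)
        rng (hrngpair.imp (fun {a b} h => ⟨by simpa using h, by simp [not_lt.mpr (le_of_lt h)]⟩))
        (P.filter (fun kv => decide (threshold ≤ kv.2)))
        (fun x hx => hmemrng x (List.mem_filter.mp hx).1)
      rw [hsorted, hBfold]
      exact List.flatMap_congr (fun c hc => by rw [hfiltereq c hc, hbuckget c hc])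
  | true =>
      simp only [if_pos]
      rw [PySem.List.sorted_rev_eq_foldl_insertBy]
      have hsorted := pv_sorted_buckets (fun u v => decide (v < u)) (fun c => by simp)
        rng.reverse
        (List.pairwise_reverse.mpr (hrngpair.imp (fun {a b} h => ⟨by simpa using h, by simp [not_lt.mpr (le_of_lt h)]⟩)))
        (P.filter (fun kv => decide (threshold ≤ kv.2)))
        (fun x hx => List.mem_reverse.mpr (hmemrng x (List.mem_filter.mp hx).1))
      rw [hsorted, hBfold]
      exact List.flatMap_congr (fun c hc =>
        by rw [hfiltereq c (List.mem_reverse.mp hc), hbuckget c (List.mem_reverse.mp hc)])
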